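-- pv_equiv track=rewrite | github.com/skyrim4ev3r/leetcode_solutions | algorithms/1_easy/S/03718_smallest_missing_multiple_of_k/hashset.py | missingMultiple
-- ===== SOURCE A (Python) =====
-- from typing import List
--
-- def missingMultiple(nums: List[int], k: int) -> int:
--     hashset = set()
--
--     for num in nums:
--         if num % k == 0:
--             hashset.add(num)
--
--     curr = k
--
--     while curr in hashset:
--         curr += k
--
--     return curr
-- ===== SOURCE B (Python) =====
-- def missingMultiple(nums, k):
--     # distinct positive multipliers m such that m*k appears in nums
--     quotients = {num // k for num in nums if num % k == 0 and num // k >= 1}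
--     expected = 1
--     for q in sorted(quotients):
--         if q == expected:
--             expected += 1
--         elif q > expected:
--             break
--     return expected * k
-- ===== Notes on version B (the rewrite author's own statement) =====
-- stated objective: alternative
-- what changed: A probes k, 2k, 3k, ... against a hash set of the multiples found in nums; B instead collects the distinct positive multipliers num//k, sorts them, and scans the sorted list for the first gap starting at 1, returning gap*k.
import Mathlib
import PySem

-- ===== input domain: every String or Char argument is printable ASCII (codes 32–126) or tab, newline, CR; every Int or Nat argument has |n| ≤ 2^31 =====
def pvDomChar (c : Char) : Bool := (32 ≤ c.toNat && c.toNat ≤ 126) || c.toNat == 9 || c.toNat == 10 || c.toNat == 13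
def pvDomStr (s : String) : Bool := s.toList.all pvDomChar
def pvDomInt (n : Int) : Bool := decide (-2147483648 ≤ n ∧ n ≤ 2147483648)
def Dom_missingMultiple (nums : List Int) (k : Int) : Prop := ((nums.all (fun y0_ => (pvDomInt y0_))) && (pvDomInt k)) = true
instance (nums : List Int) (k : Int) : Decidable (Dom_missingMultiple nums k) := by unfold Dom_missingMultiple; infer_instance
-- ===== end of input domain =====

-- B replaces A's "probe k, 2k, 3k, … against a set of multiples" walk by collecting the
-- distinct positive multipliers, sorting them, and scanning the sorted list for the first gap
-- (objective: alternative algorithm, similar cost).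

-- ===== PORT A =====
-- A's while loop, ported with fuel; fuel = |hashset| + 1 always suffices (proved below in
-- pigeonhole: the probed multiples are pairwise distinct when k ≠ 0, so at most |hashset| probes succeed).
def missingMultipleLoop (hashset : List Int) (k : Int) (curr : Int) : Nat → Int
  | 0 => curr
  | fuel + 1 => if curr ∈ hashset then missingMultipleLoop hashset k (curr + k) fuel else curr

def missingMultiple (nums : List Int) (k : Int) : Int :=
  let hashset : PySem.Set Int :=
    nums.foldl (fun s num => if PySem.Int.mod num k = 0 then PySem.Set.add s num else s) PySem.Set.empty
  missingMultipleLoop hashset k k (hashset.length + 1)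

-- ===== PORT B =====
-- B's for-loop over the sorted quotients, with its break
def missingMultipleScan : List Int → Int → Int
  | [], expected => expected
  | q :: rest, expected =>
      if q = expected then missingMultipleScan rest (expected + 1)
      else if expected < q then expected
      else missingMultipleScan rest expected

def missingMultiple_alt (nums : List Int) (k : Int) : Int :=
  let quotients : PySem.Set Int :=
    PySem.Set.ofList
      ((nums.filter (fun num => decide (PySem.Int.mod num k = 0) && decide (1 ≤ PySem.Int.floordiv num k))).map
        (fun num => PySem.Int.floordiv num k))
  missingMultipleScan (PySem.List.sorted quotients (fun x => x) false) 1 * k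

-- ===== PRECONDITION & SPEC =====
-- Pre_ excludes exactly k = 0 with nums nonempty, where Python's 'num % k' raises ZeroDivisionError in A (and in B).
def Pre_missingMultiple (nums : List Int) (k : Int) : Prop := nums = [] ∨ k ≠ 0
instance (nums : List Int) (k : Int) : Decidable (Pre_missingMultiple nums k) := by
  unfold Pre_missingMultiple; infer_instance

def pvWitness_missingMultiple : List Int × Int := ([2, 4, 7, -2], 2)

def Spec_missingMultiple (nums : List Int) (k : Int) (out : Int) : Prop := out = missingMultiple_alt nums k
instance (nums : List Int) (k : Int) (out : Int) : Decidable (Spec_missingMultiple nums k out) := by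
  unfold Spec_missingMultiple; infer_instance

-- ===== CLAIM (what is proved, stated in full; the proofs are below) =====
def Claim_equal_missingMultiple : Prop := ∀ (nums : List Int) (k : Int), Dom_missingMultiple nums k → Pre_missingMultiple nums k → Spec_missingMultiple nums k (missingMultiple nums k)

-- ===== LEMMAS AND PROOFS =====

-- A's hashset is the set of the filtered elements
theorem hashsetA_eq (nums : List Int) (k : Int) :
    nums.foldl (fun s num => if PySem.Int.mod num k = 0 then PySem.Set.add s num else s) PySem.Set.empty
      = PySem.Set.ofList (nums.filter (fun num => decide (PySem.Int.mod num k = 0))) := by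
  rw [PySem.Set.ofList_eq_foldl, PySem.List.foldl_ite_eq_foldl_filter]
  rfl

-- membership in A's hashset
theorem mem_hashsetA (nums : List Int) (k x : Int) :
    x ∈ PySem.Set.ofList (nums.filter (fun num => decide (PySem.Int.mod num k = 0)))
      ↔ x ∈ nums ∧ PySem.Int.mod x k = 0 := by
  rw [PySem.Set.mem_ofList, List.mem_filter]
  simp

-- membership in B's quotient set: m ∈ Q ↔ m ≥ 1 and m*k is a multiple of k occurring in nums
theorem mem_quotients (nums : List Int) (k m : Int) (hk : k ≠ 0) :
    m ∈ PySem.Set.ofList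
        ((nums.filter (fun num => decide (PySem.Int.mod num k = 0) && decide (1 ≤ PySem.Int.floordiv num k))).map
          (fun num => PySem.Int.floordiv num k))
      ↔ 1 ≤ m ∧ (m * k ∈ nums ∧ PySem.Int.mod (m * k) k = 0) := by
  rw [PySem.Set.mem_ofList, List.mem_map]
  constructor
  · rintro ⟨num, hnum, rfl⟩
    rw [List.mem_filter] at hnum
    obtain ⟨hmem, hcond⟩ := hnum
    simp only [Bool.and_eq_true, decide_eq_true_eq] at hcond
    obtain ⟨hmod, hge⟩ := hcond
    have hnum_eq : PySem.Int.floordiv num k * k = num := by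
      have := PySem.Int.floordiv_mul_add_mod num k
      omega
    refine ⟨hge, ?_, ?_⟩
    · rw [hnum_eq]; exact hmem
    · rw [hnum_eq]; exact hmod
  · rintro ⟨hge, hmem, hmod⟩
    have hfd : PySem.Int.floordiv (m * k) k = m := by
      have h1 := PySem.Int.floordiv_mul_add_mod (m * k) k
      rw [hmod] at h1
      have h2 : PySem.Int.floordiv (m * k) k * k = m * k := by omega
      exact mul_right_cancel₀ hk h2
    refine ⟨m * k, ?_, hfd⟩
    rw [List.mem_filter]
    refine ⟨hmem, ?_⟩
    simp only [Bool.and_eq_true, decide_eq_true_eq]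
    exact ⟨hmod, by rw [hfd]; exact hge⟩

-- unfolding equations for the scan
theorem scan_cons_eq (q : Int) (rest : List Int) (e : Int) (h : q = e) :
    missingMultipleScan (q :: rest) e = missingMultipleScan rest (e + 1) := by
  simp [missingMultipleScan, h]

theorem scan_cons_gt (q : Int) (rest : List Int) (e : Int) (h1 : q ≠ e) (h2 : e < q) :
    missingMultipleScan (q :: rest) e = e := by
  simp [missingMultipleScan, if_neg h1, if_pos h2]

-- the scan over a strictly increasing list of values ≥ e returns the least n ≥ e absent from it
theorem scan_spec (qs : List Int) (e : Int)
    (hsorted : qs.Pairwise (· < ·)) (hge : ∀ q ∈ qs, e ≤ q) :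
    e ≤ missingMultipleScan qs e ∧ missingMultipleScan qs e ∉ qs ∧
      ∀ m, e ≤ m → m < missingMultipleScan qs e → m ∈ qs := by
  induction qs generalizing e with
  | nil => exact ⟨le_refl e, by simp, fun m h1 h2 => absurd (lt_of_le_of_lt h1 h2) (lt_irrefl e)⟩
  | cons q rest ih =>
    have hq : e ≤ q := hge q (List.mem_cons_self)
    have hrest_gt : ∀ x ∈ rest, q < x := fun x hx => (List.pairwise_cons.mp hsorted).1 x hx
    by_cases heq : q = e
    · rw [scan_cons_eq q rest e heq]
      obtain ⟨h1, h2, h3⟩ := ih (e + 1) (List.pairwise_cons.mp hsorted).2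
        (fun x hx => by have := hrest_gt x hx; omega)
      refine ⟨by omega, ?_, ?_⟩
      · intro hmem
        rcases List.mem_cons.mp hmem with h | h
        · omega
        · exact h2 h
      · intro m hm1 hm2
        by_cases hme : m = e
        · exact hme ▸ heq ▸ List.mem_cons_self
        · exact List.mem_cons_of_mem _ (h3 m (by omega) hm2)
    · have hlt : e < q := lt_of_le_of_ne hq (fun h => heq h.symm)
      rw [scan_cons_gt q rest e heq hlt]
      refine ⟨le_refl e, ?_, fun m h1 h2 => absurd (lt_of_le_of_lt h1 h2) (lt_irrefl e)⟩
      intro hmem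
      rcases List.mem_cons.mp hmem with h | h
      · omega
      · exact absurd (hrest_gt e h) (by omega)

-- A's while loop reaches the least absent multiple
theorem loop_spec (hs : List Int) (k N : Int) (j : Int) (fuel : Nat)
    (hj : j ≤ N) (hmem : ∀ m, j ≤ m → m < N → m * k ∈ hs) (hN : N * k ∉ hs)
    (hfuel : N - j < (fuel : Int)) :
    missingMultipleLoop hs k (j * k) fuel = N * k := by
  induction fuel generalizing j with
  | zero => simp at hfuel; omega
  | succ fuel ih =>
    simp only [missingMultipleLoop]
    by_cases hin : j * k ∈ hs
    · rw [if_pos hin]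
      have hjN : j < N := by
        rcases lt_or_eq_of_le hj with h | h
        · exact h
        · exact absurd (h ▸ hin) hN
      have harith : j * k + k = (j + 1) * k := by ring
      rw [harith]
      exact ih (j + 1) (by omega) (fun m h1 h2 => hmem m (by omega) h2) (by omega)
    · rw [if_neg hin]
      rcases lt_or_eq_of_le hj with h | h
      · exact absurd (hmem j (le_refl j) h) hin
      · rw [h]

-- pigeonhole: if all of k, 2k, …, (r-1)k lie in the nodup list hs, then r - 1 ≤ |hs|
theorem pigeonhole (hs : List Int) (k r : Int) (hk : k ≠ 0) (hr : 1 ≤ r)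
    (hmem : ∀ m, 1 ≤ m → m < r → m * k ∈ hs) : r - 1 ≤ (hs.length : Int) := by
  set L : List Int := (List.range (r - 1).toNat).map (fun (i : Nat) => ((i : Int) + 1) * k) with hL
  have hLnodup : L.Nodup := by
    apply List.Nodup.map
    · intro a b hab
      have h2 : (a : Int) + 1 = (b : Int) + 1 := mul_right_cancel₀ hk hab
      omega
    · exact List.nodup_range
  have hLsub : L ⊆ hs := by
    intro x hx
    rw [hL, List.mem_map] at hx
    obtain ⟨i, hi, rfl⟩ := hx
    rw [List.mem_range] at hi
    exact hmem ((i : Int) + 1) (by omega) (by omega)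
  have hlen : L.length ≤ hs.length := List.Subperm.length_le (List.subperm_of_subset hLnodup hLsub)
  have : L.length = (r - 1).toNat := by rw [hL]; simp
  omega

-- sorted distinct quotients are strictly increasing
theorem sorted_strict (xs : List Int) (hnodup : xs.Nodup) :
    (PySem.List.sorted xs (fun x => x) false).Pairwise (· < ·) := by
  have hperm := PySem.List.sorted_perm xs (fun x => x) false
  have hle : (PySem.List.sorted xs (fun x => x) false).Pairwise (· ≤ ·) :=
    PySem.List.sorted_pairwise xs _
  have hnd : (PySem.List.sorted xs (fun x => x) false).Nodup := hperm.nodup_iff.mpr hnodup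
  exact (hle.and hnd).imp (fun h => lt_of_le_of_ne h.1 h.2)

-- the main argument for k ≠ 0
theorem main_ne_zero (nums : List Int) (k : Int) (hk : k ≠ 0) :
    missingMultiple nums k = missingMultiple_alt nums k := by
  unfold missingMultiple missingMultiple_alt
  simp only [hashsetA_eq]
  set S : List Int := PySem.Set.ofList (nums.filter (fun num => decide (PySem.Int.mod num k = 0))) with hS
  set Q : List Int := PySem.Set.ofList
      ((nums.filter (fun num => decide (PySem.Int.mod num k = 0) && decide (1 ≤ PySem.Int.floordiv num k))).map
        (fun num => PySem.Int.floordiv num k)) with hQ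
  set qs : List Int := PySem.List.sorted Q (fun x => x) false with hqs
  have hQnodup : Q.Nodup := PySem.Set.nodup_ofList _
  have hqs_perm : qs.Perm Q := PySem.List.sorted_perm Q (fun x => x) false
  obtain ⟨hr1, hrnot, hrall⟩ := scan_spec qs 1 (sorted_strict Q hQnodup)
      (fun q hq => ((mem_quotients nums k q hk).mp (hQ ▸ hqs_perm.mem_iff.mp hq)).1)
  set r : Int := missingMultipleScan qs 1 with hr
  have hmemS : ∀ m, 1 ≤ m → m < r → m * k ∈ S := by
    intro m h1 h2
    have hmQ : m ∈ Q := hqs_perm.mem_iff.mp (hrall m h1 h2)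
    have := (mem_quotients nums k m hk).mp (hQ ▸ hmQ)
    rw [hS, mem_hashsetA]
    exact this.2
  have hrS : r * k ∉ S := by
    intro hmem
    rw [hS, mem_hashsetA] at hmem
    exact hrnot (hqs_perm.mem_iff.mpr ((mem_quotients nums k r hk).mpr ⟨hr1, hmem⟩))
  have hbound := pigeonhole S k r hk hr1 hmemS
  have hfinal := loop_spec S k r 1 (S.length + 1) hr1 hmemS hrS (by omega)
  rw [one_mul] at hfinal
  exact hfinal

-- ===== VERDICT (by name: the statement is the Claim_ definition above) =====
theorem missingMultiple_spec : Claim_equal_missingMultiple := by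
  intro nums k _ hpre
  unfold Spec_missingMultiple
  by_cases hk : k = 0
  · subst hk
    rcases hpre with h | h
    · subst h; rfl
    · exact absurd rfl h
  · exact main_ne_zero nums k hk
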